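-- pv_equiv track=rewrite | github.com/Dizerro/Sukholitkyi_LPNU_AP_Labs | lab3/test.py | generate_cipher
-- ===== SOURCE A (Python) =====
-- def generate_cipher(S, K):
--     S = list(S)
--     C = []
--     index = 0
--
--     #_ABC = ["A","B","C","D","E","F","G","H","I","J","K","M","N","L","O","P","Q","R","S","T","U","V","W","X","Y","Z"]
--     _abc = ("a","b","c","d","e","f","g","h","i","j","k","m","n","l","o","p","q","r","s","t","u","v","w","x","y","z")
--
--     while S:
--         X = (index + K - 1) % len(S)
--         if S[X] in _abc:
--             C.append(S.pop(X-1))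
--         else:
--             C.append(S.pop(X))
--
--
--     return ''.join(C)
-- ===== SOURCE B (Python) =====
-- def generate_cipher(S, K):
--     # Order-statistics segment tree (persistent tuple nodes): each step finds and
--     # deletes the selected survivor in O(log n) instead of list.pop's O(n).
--     chars = list(S)
--     n = len(chars)
--     if n == 0:
--         return ''
--
--     def build(cs):
--         if len(cs) == 1:
--             return (1, cs[0], None, None)
--         mid = len(cs) // 2
--         left = build(cs[:mid])
--         right = build(cs[mid:])
--         return (left[0] + right[0], None, left, right)
--
--     def get(t, k):  # k-th (0-based) still-alive char
--         while t[2] is not None: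
--             if k < t[2][0]:
--                 t = t[2]
--             else:
--                 k -= t[2][0]
--                 t = t[3]
--         return t[1]
--
--     def delete(t, k):  # mark k-th alive char dead
--         cnt, c, l, r = t
--         if l is None:
--             return (0, c, None, None)
--         if k < l[0]:
--             return (cnt - 1, c, delete(l, k), r)
--         return (cnt - 1, c, l, delete(r, k - l[0]))
--
--     tree = build(chars)
--     out = []
--     m = n
--     while m:
--         X = (K - 1) % m
--         i = (X - 1) % m if get(tree, X) in "abcdefghijklmnopqrstuvwxyz" else X
--         out.append(get(tree, i))
--         tree = delete(tree, i)
--         m -= 1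
--     return ''.join(out)
-- ===== Notes on version B (the rewrite author's own statement) =====
-- stated objective: faster
-- what changed: Replaces the while-loop with repeated list.pop (an O(n) shift per deletion) by an order-statistics segment tree of counts, so each step selects and deletes the k-th surviving character in O(log n).
import Mathlib
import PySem

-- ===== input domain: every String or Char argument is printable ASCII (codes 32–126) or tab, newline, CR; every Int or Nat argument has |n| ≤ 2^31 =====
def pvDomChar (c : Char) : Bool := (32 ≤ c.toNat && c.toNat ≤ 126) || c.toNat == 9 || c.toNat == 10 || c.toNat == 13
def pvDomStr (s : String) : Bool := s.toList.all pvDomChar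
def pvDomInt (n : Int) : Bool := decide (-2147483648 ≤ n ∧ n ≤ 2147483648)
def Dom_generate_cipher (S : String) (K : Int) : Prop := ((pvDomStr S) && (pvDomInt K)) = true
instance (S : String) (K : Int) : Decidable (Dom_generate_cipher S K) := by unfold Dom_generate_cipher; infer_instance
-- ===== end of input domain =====

-- B replaces A's repeated list.pop (an O(n) shift per deletion) by an order-statistics
-- segment tree, selecting and deleting the k-th surviving character in O(log n) per step.

-- ===== PORT A =====
-- the _abc tuple of A, in its original (reordered) order
def pvAbc : List Char :=
  ['a','b','c','d','e','f','g','h','i','j','k','m','n','l','o','p','q','r','s','t','u','v','w','x','y','z']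

-- the while loop of A: fuel = len(S) (each iteration pops exactly one element);
-- `index` is A's (never-updated) variable, C the accumulator
def gcLoopA : Nat → List Char → Int → List Char → List Char
  | 0, _, _, C => C
  | fuel+1, S, K, C =>
    if S = [] then C
    else
      let index : Int := 0
      let X := PySem.Int.mod (index + K - 1) (PySem.List.len S)
      match PySem.List.pyGet? S X with
      | none => C  -- unreachable: 0 ≤ X < len S
      | some c =>
        match PySem.List.pop? S (if c ∈ pvAbc then X - 1 else X) with
        | none => C  -- unreachable
        | some (e, S') => gcLoopA fuel S' K (C ++ [e])

def generate_cipher (S : String) (K : Int) : String :=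
  String.ofList (gcLoopA S.toList.length S.toList K [])

-- ===== PORT B =====
-- Source B's tuple nodes (cnt, char, left, right): leaf = (cnt, c, None, None)
inductive GTree where
  | leaf : Nat → Char → GTree
  | node : Nat → GTree → GTree → GTree
deriving DecidableEq, Repr

def GTree.cnt : GTree → Nat
  | .leaf n _ => n
  | .node n _ _ => n

-- Source B get: descend to the k-th alive char (ported as the obvious structural recursion)
def GTree.get : GTree → Nat → Char
  | .leaf _ c, _ => c
  | .node _ l r, k => if k < l.cnt then l.get k else r.get (k - l.cnt)

-- Source B delete: mark the k-th alive char dead, decrementing counts on the path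
def GTree.del : GTree → Nat → GTree
  | .leaf _ c, _ => .leaf 0 c
  | .node n l r, k =>
      if k < l.cnt then .node (n-1) (l.del k) r else .node (n-1) l (r.del (k - l.cnt))

-- Source B build over a nonempty list, splitting at mid = len(cs)//2 (cs[:mid] / cs[mid:])
def pvBuild : List Char → GTree
  | [] => .leaf 0 ' '  -- unreachable: Source B never builds an empty segment
  | [c] => .leaf 1 c
  | c0 :: c1 :: rest =>
      .node (c0 :: c1 :: rest).length
        (pvBuild ((c0 :: c1 :: rest).take ((c0 :: c1 :: rest).length / 2)))
        (pvBuild ((c0 :: c1 :: rest).drop ((c0 :: c1 :: rest).length / 2)))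
termination_by cs => cs.length
decreasing_by
  · simp [List.length_take]; omega
  · simp [List.length_drop]; omega

-- membership in "abcdefghijklmnopqrstuvwxyz" (1-char needle: char membership)
def pvLower : List Char := "abcdefghijklmnopqrstuvwxyz".toList

-- one iteration's locals X and i of Source B's while loop (m = current count)
def gcIdxB (t : GTree) (K : Int) (m : Nat) : Int :=
  let X := PySem.Int.mod (K - 1) ((m : Int) + 1)
  if t.get X.toNat ∈ pvLower then PySem.Int.mod (X - 1) ((m : Int) + 1) else X

-- Source B while loop: fuel = m (decremented each iteration), out the accumulator
def gcLoopB : Nat → GTree → Int → List Char → List Char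
  | 0, _, _, out => out
  | m+1, t, K, out =>
      gcLoopB m (t.del (gcIdxB t K m).toNat) K (out ++ [t.get (gcIdxB t K m).toNat])

def generate_cipher_alt (S : String) (K : Int) : String :=
  if S.toList.length = 0 then ""
  else String.ofList (gcLoopB S.toList.length (pvBuild S.toList) K [])

-- ===== PRECONDITION & SPEC =====
def Spec_generate_cipher (S : String) (K : Int) (out : String) : Prop := out = generate_cipher_alt S K
instance (S : String) (K : Int) (out : String) : Decidable (Spec_generate_cipher S K out) := by unfold Spec_generate_cipher; infer_instance

-- ===== CLAIM (what is proved, stated in full; the proofs are below) =====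
def Claim_equal_generate_cipher : Prop := ∀ (S : String) (K : Int), Dom_generate_cipher S K → Spec_generate_cipher S K (generate_cipher S K)

-- ===== LEMMAS AND PROOFS =====

-- the alive characters of a tree, in order
def GTree.alive : GTree → List Char
  | .leaf n c => if n = 0 then [] else [c]
  | .node _ l r => l.alive ++ r.alive

-- well-formedness: stored counts match the number of alive chars below
def GTree.WF : GTree → Prop
  | .leaf n _ => n ≤ 1
  | .node n l r => n = l.cnt + r.cnt ∧ l.WF ∧ r.WF

theorem gtree_cnt_node (n : Nat) (l r : GTree) : (GTree.node n l r).cnt = n := rfl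
theorem gtree_alive_node (n : Nat) (l r : GTree) :
    (GTree.node n l r).alive = l.alive ++ r.alive := rfl

theorem gtree_cnt_eq {t : GTree} (h : t.WF) : t.cnt = t.alive.length := by
  induction t with
  | leaf n c =>
      simp [GTree.WF] at h
      rcases Nat.le_one_iff_eq_zero_or_eq_one.mp h with h | h <;>
        simp [GTree.cnt, GTree.alive, h]
  | node n l r ihl ihr =>
      obtain ⟨hn, hl, hr⟩ := h
      rw [gtree_cnt_node, gtree_alive_node, List.length_append, hn, ihl hl, ihr hr]

theorem gtree_get_eq {t : GTree} (h : t.WF) {k : Nat} (hk : k < t.alive.length) :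
    t.get k = t.alive[k] := by
  induction t generalizing k with
  | leaf n c =>
      simp [GTree.WF] at h
      rcases Nat.le_one_iff_eq_zero_or_eq_one.mp h with h | h <;>
        simp [GTree.alive, h] at hk ⊢ <;> simp [GTree.get]
  | node n l r ihl ihr =>
      obtain ⟨hn, hl, hr⟩ := h
      simp only [gtree_alive_node] at hk ⊢
      simp only [GTree.get, gtree_cnt_eq hl]
      by_cases hcase : k < l.alive.length
      · rw [if_pos hcase, List.getElem_append_left hcase, ihl hl hcase]
      · rw [if_neg hcase]
        have hk' : k - l.alive.length < r.alive.length := by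
          simp [List.length_append] at hk; omega
        rw [List.getElem_append_right (by omega), ihr hr hk']

theorem gtree_del_alive {t : GTree} (h : t.WF) {k : Nat} (hk : k < t.alive.length) :
    (t.del k).alive = t.alive.eraseIdx k := by
  induction t generalizing k with
  | leaf n c =>
      simp [GTree.WF] at h
      rcases Nat.le_one_iff_eq_zero_or_eq_one.mp h with h | h <;>
        simp [GTree.alive, h] at hk ⊢ <;> simp [GTree.del, GTree.alive, hk]
  | node n l r ihl ihr =>
      obtain ⟨hn, hl, hr⟩ := h
      simp only [gtree_alive_node] at hk ⊢
      simp only [GTree.del, gtree_cnt_eq hl]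
      by_cases hcase : k < l.alive.length
      · rw [if_pos hcase]
        simp [GTree.alive, ihl hl hcase, List.eraseIdx_append_of_lt_length hcase]
      · rw [if_neg hcase]
        have hk' : k - l.alive.length < r.alive.length := by
          simp [List.length_append] at hk; omega
        simp [GTree.alive, ihr hr hk',
          List.eraseIdx_append_of_length_le (by omega : l.alive.length ≤ k)]

theorem gtree_del_wf {t : GTree} (h : t.WF) {k : Nat} (hk : k < t.alive.length) :
    (t.del k).WF := by
  induction t generalizing k with
  | leaf n c => simp [GTree.del, GTree.WF]
  | node n l r ihl ihr =>
      obtain ⟨hn, hl, hr⟩ := h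
      have hcl := gtree_cnt_eq hl
      have hcr := gtree_cnt_eq hr
      simp only [gtree_alive_node, List.length_append] at hk
      simp only [GTree.del, gtree_cnt_eq hl]
      by_cases hcase : k < l.alive.length
      · rw [if_pos hcase]
        refine ⟨?_, ihl hl hcase, hr⟩
        have hc : (l.del k).cnt = ((l.alive.eraseIdx k)).length := by
          rw [gtree_cnt_eq (ihl hl hcase), gtree_del_alive hl hcase]
        rw [hc, List.length_eraseIdx_of_lt hcase]
        omega
      · rw [if_neg hcase]
        have hk' : k - l.alive.length < r.alive.length := by omega
        refine ⟨?_, hl, ihr hr hk'⟩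
        have hc : (r.del (k - l.alive.length)).cnt
            = ((r.alive.eraseIdx (k - l.alive.length))).length := by
          rw [gtree_cnt_eq (ihr hr hk'), gtree_del_alive hr hk']
        rw [hc, List.length_eraseIdx_of_lt hk']
        omega

theorem pvBuild_alive (cs : List Char) : (pvBuild cs).alive = cs := by
  fun_induction pvBuild cs with
  | case1 => simp [GTree.alive]
  | case2 c => simp [GTree.alive]
  | case3 c0 c1 rest ih1 ih2 =>
      rw [gtree_alive_node, ih1, ih2, List.take_append_drop]

theorem pvBuild_wf (cs : List Char) : (pvBuild cs).WF := by
  fun_induction pvBuild cs with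
  | case1 => simp [GTree.WF]
  | case2 c => simp [GTree.WF]
  | case3 c0 c1 rest ih1 ih2 =>
      refine ⟨?_, ih1, ih2⟩
      rw [gtree_cnt_eq ih1, gtree_cnt_eq ih2, pvBuild_alive, pvBuild_alive]
      simp only [List.length_take, List.length_drop]
      omega

theorem pvAbc_mem_iff (c : Char) : c ∈ pvAbc ↔ c ∈ pvLower := by
  have h : pvAbc.Perm pvLower := by decide
  exact h.mem_iff

theorem neg_one_emod (m : Int) (h : 0 < m) : (-1 : Int) % m = m - 1 := by
  rw [show (-1 : Int) = (m - 1) + m * (-1) by ring, Int.add_mul_emod_self_left,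
    Int.emod_eq_of_lt (by omega) (by omega)]

theorem loop_eq (m : Nat) : ∀ (S : List Char) (t : GTree) (K : Int) (C : List Char),
    S.length = m → t.WF → t.alive = S → gcLoopA m S K C = gcLoopB m t K C := by
  induction m with
  | zero => intro S t K C _ _ _; simp [gcLoopA, gcLoopB]
  | succ m ih =>
      intro S t K C hlen hwf halive
      have hS : S ≠ [] := by intro h; subst h; simp at hlen
      obtain ⟨X, hX0, hXlt, hXdef⟩ :
          ∃ X : Int, 0 ≤ X ∧ X < (m : Int) + 1 ∧ X = PySem.Int.mod (K - 1) ((m : Int) + 1) :=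
        ⟨_, PySem.Int.mod_nonneg _ (by omega), PySem.Int.mod_lt _ (by omega), rfl⟩
      have hlen' : ((S.length : Nat) : Int) = (m : Int) + 1 := by omega
      have hXnat : X.toNat < S.length := by omega
      have halen : t.alive.length = m + 1 := by rw [halive, hlen]
      -- A's selector equals B's
      have hXA : PySem.Int.mod ((0 : Int) + K - 1) (PySem.List.len S) = X := by
        rw [hXdef, PySem.List.len_eq, hlen']; congr 1; ring
      have hgetX : t.get X.toNat = S[X.toNat]'hXnat := by
        rw [gtree_get_eq hwf (by omega)]
        simp [halive]
      rw [gcLoopA, if_neg hS]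
      simp only [hXA,
        PySem.List.pyGet?_eq_some_getElem S hX0 (by omega : X < (S.length : Int))]
      rw [gcLoopB]
      by_cases hmem : S[X.toNat]'hXnat ∈ pvAbc
      · rw [if_pos hmem]
        by_cases hX1 : X = 0
        · -- Python pop(-1): the last element
          subst hX1
          obtain ⟨ys, y, hSy⟩ : ∃ ys y, S = ys ++ [y] :=
            ⟨S.dropLast, S.getLast hS, (List.dropLast_append_getLast hS).symm⟩
          have hys : ys.length = m := by
            have := hlen; rw [hSy] at this; simp at this; omega
          have hidx : gcIdxB t K m = (m : Int) := by
            simp only [gcIdxB, ← hXdef, hgetX, if_pos ((pvAbc_mem_iff _).mp hmem)]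
            rw [PySem.Int.mod_eq_emod_of_pos (by omega),
              show (0 : Int) - 1 = -1 by ring, neg_one_emod _ (by omega)]
            ring
          rw [show (0 : Int) - 1 = -1 by ring, hSy, PySem.List.pop?_last, hidx]
          simp only [Int.toNat_natCast]
          have hmlt : m < t.alive.length := by omega
          have hy : t.get m = y := by
            rw [gtree_get_eq hwf hmlt]
            simp only [halive, hSy]
            rw [List.getElem_append_right (by omega)]
            simp [hys]
          have herase : (t.del m).alive = ys := by
            rw [gtree_del_alive hwf hmlt, halive, hSy, ← hys,
              List.eraseIdx_append_of_length_le (le_refl _)]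
            simp
          rw [hy]
          exact ih ys (t.del m) K (C ++ [y])
            (by omega) (gtree_del_wf hwf hmlt) herase
        · -- X ≥ 1: pop index X - 1 ≥ 0
          have hj : X - 1 = ((X.toNat - 1 : Nat) : Int) := by omega
          have hjlt : X.toNat - 1 < S.length := by omega
          have hidx : gcIdxB t K m = X - 1 := by
            simp only [gcIdxB, ← hXdef, hgetX, if_pos ((pvAbc_mem_iff _).mp hmem)]
            rw [PySem.Int.mod_eq_emod_of_pos (by omega),
              Int.emod_eq_of_lt (by omega) (by omega)]
          rw [hj, PySem.List.pop?_natCast S (X.toNat - 1) hjlt, hidx]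
          have hjnat : (X - 1).toNat = X.toNat - 1 := by omega
          rw [hjnat]
          have hjlt' : X.toNat - 1 < t.alive.length := by omega
          have hg : t.get (X.toNat - 1) = S[X.toNat - 1]'hjlt := by
            rw [gtree_get_eq hwf hjlt']; simp [halive]
          rw [hg]
          exact ih _ _ K _
            (by rw [List.length_eraseIdx_of_lt hjlt]; omega)
            (gtree_del_wf hwf hjlt')
            (by rw [gtree_del_alive hwf hjlt', halive])
      · rw [if_neg hmem]
        have hidx : gcIdxB t K m = X := by
          simp only [gcIdxB, ← hXdef, hgetX,
            if_neg (fun h => hmem ((pvAbc_mem_iff _).mpr h))]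
        have hj : X = ((X.toNat : Nat) : Int) := by omega
        rw [show PySem.List.pop? S X = some (S[X.toNat]'hXnat, S.eraseIdx X.toNat) from by
          conv_lhs => rw [hj]
          exact PySem.List.pop?_natCast S X.toNat hXnat]
        rw [hidx]
        have hXlt' : X.toNat < t.alive.length := by omega
        rw [hgetX]
        exact ih _ _ K _
          (by rw [List.length_eraseIdx_of_lt hXnat]; omega)
          (gtree_del_wf hwf hXlt')
          (by rw [gtree_del_alive hwf hXlt', halive])

-- ===== VERDICT (by name: the statement is the Claim_ definition above) =====
theorem generate_cipher_spec : Claim_equal_generate_cipher := by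
  intro S K _
  unfold Spec_generate_cipher generate_cipher generate_cipher_alt
  by_cases h : S.toList.length = 0
  · rw [if_pos h, List.length_eq_zero_iff.mp h]
    rfl
  · rw [if_neg h,
      loop_eq S.toList.length S.toList (pvBuild S.toList) K [] rfl
        (pvBuild_wf _) (pvBuild_alive _)]
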